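-- pv_equiv track=rewrite | github.com/danielk0k/AdventofCode2021 | Day8/SevenSegmentSearch.py | getUniquePattern
-- ===== SOURCE A (Python) =====
-- def getUniquePattern(lst):
--     temp = []
--     for pat in lst:
--         len_pat = len(pat)
--         if (len_pat == 2 or len_pat == 3 or len_pat == 4 or len_pat == 7):
--             temp.append(pat)
--     temp.sort(key=len)
--     return temp
-- ===== SOURCE B (Python) =====
-- def getUniquePattern(lst):
--     out = []
--     for target in (2, 3, 4, 7):
--         for pat in lst:
--             if len(pat) == target:
--                 out.append(pat)
--     return out
-- ===== Notes on version B (the rewrite author's own statement) =====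
-- stated objective: alternative
-- what changed: Replaces filter-then-stable-sort-by-length with a bucket pass: for each target length in ascending order (2,3,4,7) scan the list and collect matching patterns, so no comparison sort is performed.
import Mathlib
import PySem

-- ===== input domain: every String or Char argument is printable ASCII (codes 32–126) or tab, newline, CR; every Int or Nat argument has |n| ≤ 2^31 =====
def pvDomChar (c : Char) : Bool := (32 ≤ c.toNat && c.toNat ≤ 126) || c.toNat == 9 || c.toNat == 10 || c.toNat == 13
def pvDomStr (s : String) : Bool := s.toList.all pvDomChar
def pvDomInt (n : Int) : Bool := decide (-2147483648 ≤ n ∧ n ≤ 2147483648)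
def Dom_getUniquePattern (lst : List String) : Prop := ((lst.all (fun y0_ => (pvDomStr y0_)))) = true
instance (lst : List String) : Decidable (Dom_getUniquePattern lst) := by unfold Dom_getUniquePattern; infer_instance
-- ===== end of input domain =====

-- B replaces A's filter-then-stable-sort-by-length with one bucket pass per target length (2,3,4,7 in ascending order); same output, no comparison sort.

-- ===== PORT A =====
def getUniquePattern (lst : List String) : List String :=
  let temp := lst.foldl (fun temp pat =>
    let len_pat := PySem.Str.len pat
    if len_pat == 2 || len_pat == 3 || len_pat == 4 || len_pat == 7
    then temp ++ [pat] else temp) []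
  PySem.List.sorted temp PySem.Str.len

-- ===== PORT B =====
def getUniquePattern_alt (lst : List String) : List String :=
  [(2 : Int), 3, 4, 7].foldl (fun out target =>
    lst.foldl (fun out pat =>
      if PySem.Str.len pat == target then out ++ [pat] else out) out) []

-- ===== PRECONDITION & SPEC =====
def Spec_getUniquePattern (lst : List String) (out : List String) : Prop := out = getUniquePattern_alt lst
instance (lst : List String) (out : List String) : Decidable (Spec_getUniquePattern lst out) := by unfold Spec_getUniquePattern; infer_instance

-- ===== CLAIM (what is proved, stated in full; the proofs are below) =====
def Claim_equal_getUniquePattern : Prop := ∀ (lst : List String), Dom_getUniquePattern lst → Spec_getUniquePattern lst (getUniquePattern lst)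

-- ===== LEMMAS AND PROOFS =====

-- insertBy skips a prefix it is not 'before'
theorem pv_insertBy_append {α : Type} (before : α → α → Bool) (x : α) (ys zs : List α)
    (h : ∀ y ∈ ys, before x y = false) :
    PySem.List.insertBy before x (ys ++ zs) = ys ++ PySem.List.insertBy before x zs := by
  induction ys with
  | nil => simp
  | cons y ys ih =>
    have hy : before x y = false := h y (by simp)
    simp [PySem.List.insertBy, hy, ih (fun a ha => h a (by simp [ha]))]

-- insertBy places x at the front of a block it is 'before'
theorem pv_insertBy_front {α : Type} (before : α → α → Bool) (x : α) (zs : List α)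
    (h : ∀ y ∈ zs, before x y = true) :
    PySem.List.insertBy before x zs = x :: zs := by
  cases zs with
  | nil => simp [PySem.List.insertBy]
  | cons y ys => simp [PySem.List.insertBy, h y (by simp)]

theorem pv_sorted_append_singleton (xs : List String) (x : String) :
    PySem.List.sorted (xs ++ [x]) PySem.Str.len false =
      PySem.List.insertBy (fun a b => decide (PySem.Str.len a < PySem.Str.len b)) x
        (PySem.List.sorted xs PySem.Str.len false) := by
  rw [PySem.List.sorted_eq_foldl_insertBy, PySem.List.sorted_eq_foldl_insertBy,
    List.foldl_append]
  rfl

def pvP (pat : String) : Bool :=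
  PySem.Str.len pat == 2 || PySem.Str.len pat == 3 || PySem.Str.len pat == 4 || PySem.Str.len pat == 7

def pvF (k : Int) (lst : List String) : List String := lst.filter (fun pat => PySem.Str.len pat == k)

theorem pv_mem_F {k : Int} {lst : List String} {y : String} (h : y ∈ pvF k lst) :
    PySem.Str.len y = k := by
  have := (List.mem_filter.mp h).2
  exact by simpa using this

-- the heart: stable sort by length of the filtered list = the four buckets in order
theorem pv_bucket (lst : List String) :
    PySem.List.sorted (lst.filter pvP) PySem.Str.len false =
      pvF 2 lst ++ pvF 3 lst ++ pvF 4 lst ++ pvF 7 lst := by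
  induction lst using List.reverseRecOn with
  | nil => rfl
  | append_singleton l x ih =>
    have hfk : ∀ k : Int, pvF k (l ++ [x]) =
        pvF k l ++ List.filter (fun pat => PySem.Str.len pat == k) [x] := by
      intro k; simp [pvF, List.filter_append]
    have hf : ∀ k : Int, List.filter (fun pat => PySem.Str.len pat == k) [x] =
        if PySem.Str.len x = k then [x] else [] := by
      intro k
      by_cases hk : PySem.Str.len x = k <;> simp [List.filter_singleton, hk]
    by_cases hp : pvP x = true
    · have hx := hp
      simp only [pvP, Bool.or_eq_true, beq_iff_eq] at hx
      have hstep : (l ++ [x]).filter pvP = l.filter pvP ++ [x] := by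
        simp [List.filter_append, hp]
      rw [hstep, pv_sorted_append_singleton, ih]
      rcases hx with ((h2 | h3) | h4) | h7
      · rw [show pvF 2 l ++ pvF 3 l ++ pvF 4 l ++ pvF 7 l =
            pvF 2 l ++ (pvF 3 l ++ pvF 4 l ++ pvF 7 l) by simp]
        rw [pv_insertBy_append _ _ _ _ (fun y hy => by
          have h := pv_mem_F hy; have hX := h2
          simp [PySem.Str.len_eq] at h hX ⊢; omega)]
        rw [pv_insertBy_front _ _ _ (fun y hy => by
          rcases List.mem_append.mp hy with hy | hy
          · rcases List.mem_append.mp hy with hy | hy <;>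
              (have h := pv_mem_F hy; have hX := h2
               simp [PySem.Str.len_eq] at h hX ⊢; omega)
          · have h := pv_mem_F hy; have hX := h2
            simp [PySem.Str.len_eq] at h hX ⊢; omega)]
        simp only [hfk, hf, h2]
        simp
      · rw [show pvF 2 l ++ pvF 3 l ++ pvF 4 l ++ pvF 7 l =
            (pvF 2 l ++ pvF 3 l) ++ (pvF 4 l ++ pvF 7 l) by simp]
        rw [pv_insertBy_append _ _ _ _ (fun y hy => by
          rcases List.mem_append.mp hy with hy | hy <;>
            (have h := pv_mem_F hy; have hX := h3
             simp [PySem.Str.len_eq] at h hX ⊢; omega))]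
        rw [pv_insertBy_front _ _ _ (fun y hy => by
          rcases List.mem_append.mp hy with hy | hy <;>
            (have h := pv_mem_F hy; have hX := h3
             simp [PySem.Str.len_eq] at h hX ⊢; omega))]
        simp only [hfk, hf, h3]
        simp
      · rw [show pvF 2 l ++ pvF 3 l ++ pvF 4 l ++ pvF 7 l =
            (pvF 2 l ++ pvF 3 l ++ pvF 4 l) ++ pvF 7 l by simp]
        rw [pv_insertBy_append _ _ _ _ (fun y hy => by
          rcases List.mem_append.mp hy with hy | hy
          · rcases List.mem_append.mp hy with hy | hy <;>
              (have h := pv_mem_F hy; have hX := h4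
               simp [PySem.Str.len_eq] at h hX ⊢; omega)
          · have h := pv_mem_F hy; have hX := h4
            simp [PySem.Str.len_eq] at h hX ⊢; omega)]
        rw [pv_insertBy_front _ _ _ (fun y hy => by
          have h := pv_mem_F hy; have hX := h4
          simp [PySem.Str.len_eq] at h hX ⊢; omega)]
        simp only [hfk, hf, h4]
        simp
      · rw [show pvF 2 l ++ pvF 3 l ++ pvF 4 l ++ pvF 7 l =
            (pvF 2 l ++ pvF 3 l ++ pvF 4 l) ++ pvF 7 l by simp]
        rw [pv_insertBy_append _ _ _ _ (fun y hy => by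
          rcases List.mem_append.mp hy with hy | hy
          · rcases List.mem_append.mp hy with hy | hy <;>
              (have h := pv_mem_F hy; have hX := h7
               simp [PySem.Str.len_eq] at h hX ⊢; omega)
          · have h := pv_mem_F hy; have hX := h7
            simp [PySem.Str.len_eq] at h hX ⊢; omega)]
        rw [PySem.List.insertBy_of_forall_not_before _ _ _ (fun y hy => by
          have h := pv_mem_F hy; have hX := h7
          simp [PySem.Str.len_eq] at h hX ⊢; omega)]
        simp only [hfk, hf, h7]
        simp
    · have hx := hp
      simp only [pvP, Bool.or_eq_true, beq_iff_eq, not_or, Bool.not_eq_true] at hx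
      have hstep : (l ++ [x]).filter pvP = l.filter pvP := by
        simp [List.filter_append, hp]
      rw [hstep, ih]
      simp only [hfk, hf]
      simp only [PySem.Str.len_eq, String.length_toList] at hx
      simp [PySem.Str.len_eq, hx.1.1.1, hx.1.1.2, hx.1.2, hx.2]

theorem pv_A_eq (lst : List String) :
    getUniquePattern lst = PySem.List.sorted (lst.filter pvP) PySem.Str.len false := by
  unfold getUniquePattern
  rw [PySem.List.foldl_append_if_eq_filter]
  rfl

theorem pv_B_eq (lst : List String) :
    getUniquePattern_alt lst = pvF 2 lst ++ pvF 3 lst ++ pvF 4 lst ++ pvF 7 lst := by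
  unfold getUniquePattern_alt
  simp only [List.foldl_cons, List.foldl_nil, PySem.List.foldl_append_if_eq_filter]
  simp [pvF]

-- ===== VERDICT (by name: the statement is the Claim_ definition above) =====
theorem getUniquePattern_spec : Claim_equal_getUniquePattern := by
  intro lst _
  unfold Spec_getUniquePattern
  rw [pv_A_eq, pv_B_eq, pv_bucket]
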